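-- pv_equiv track=rewrite | github.com/chaychuakip-a11y/ubctc | 3_ub_fb40/2_train/decode_wav.py | state_ids_to_phones
-- ===== SOURCE A (Python) =====
-- def triphone_to_phone(label: str) -> str:
--     """
--     从 triphone state 标签中提取中心 phone.
--
--     HTK triphone 格式:  left-CENTER+right  或  left-CENTER+right_sN
--     本函数提取 CENTER 部分, 若解析失败则返回原始标签.
--
--     示例:
--         'a-b+c'      -> 'b'
--         'a-b+c_s2'   -> 'b'
--         'sil'        -> 'sil'
--         'sil_s2'     -> 'sil'
--         'sp'         -> 'sp'
--     """
--     # 去掉 HTK state 后缀 _sN 或 [N]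
--     label = label.split('_s')[0].split('[')[0]
--
--     if '-' in label and '+' in label:
--         # left-CENTER+right
--         center = label.split('-', 1)[1].split('+', 1)[0]
--         return center
--     elif '-' in label:
--         # left-CENTER (无右上下文)
--         return label.split('-', 1)[1]
--     elif '+' in label:
--         # CENTER+right (无左上下文)
--         return label.split('+', 1)[0]
--     else:
--         # 单音素 (sil, sp, monophone)
--         return label
--
-- def state_ids_to_phones(hyp_ids: list, id2lab: dict) -> list:
--     """
--     将 CTC 解码的 state ID 序列转换为去重后的 phone 序列.
--
--     步骤:
--       1. state ID -> triphone label (via id2lab)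
--       2. triphone label -> center phone (via triphone_to_phone)
--       3. 合并连续相同 phone (CTC 已去重, 此处处理跨 state 的同 phone)
--       4. 过滤静音 phone (sil, sp)
--
--     Args:
--         hyp_ids : CTC 解码输出的 state ID 列表
--         id2lab  : {id -> triphone_label} 字典
--
--     Returns:
--         phones  : List[str]  phone 序列 (已去重, 已过滤静音)
--     """
--     SILENCE = {'sil', 'sp', 'SIL', 'SP', 'silence'}
--
--     phones, prev = [], None
--     for sid in hyp_ids:
--         label = id2lab.get(sid, f'<unk:{sid}>')
--         phone = triphone_to_phone(label)
--         if phone in SILENCE: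
--             prev = phone
--             continue
--         if phone != prev:
--             phones.append(phone)
--         prev = phone
--     return phones
-- ===== SOURCE B (Python) =====
-- SILENCE = {'sil', 'sp', 'SIL', 'SP', 'silence'}
--
-- def triphone_to_phone(label: str) -> str:
--     label = label.split('_s')[0].split('[')[0]
--     if '-' in label and '+' in label:
--         return label.split('-', 1)[1].split('+', 1)[0]
--     elif '-' in label:
--         return label.split('-', 1)[1]
--     elif '+' in label:
--         return label.split('+', 1)[0]
--     else:
--         return label
--
-- def state_ids_to_phones(hyp_ids: list, id2lab: dict) -> list:
--     # three shaped passes: convert all, collapse consecutive duplicates by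
--     # zipping with the shifted list, then filter silences
--     centers = [triphone_to_phone(id2lab.get(sid, f'<unk:{sid}>')) for sid in hyp_ids]
--     collapsed = [p for p, q in zip(centers, [None] + centers) if p != q]
--     return [p for p in collapsed if p not in SILENCE]
-- ===== Notes on version B (the rewrite author's own statement) =====
-- stated objective: idiomatic
-- what changed: Replaces the single stateful prev-tracking loop with three declarative passes: map all ids to center phones, collapse consecutive duplicates by zipping the list with its shifted self, then filter out the silence phones.
import Mathlib
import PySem

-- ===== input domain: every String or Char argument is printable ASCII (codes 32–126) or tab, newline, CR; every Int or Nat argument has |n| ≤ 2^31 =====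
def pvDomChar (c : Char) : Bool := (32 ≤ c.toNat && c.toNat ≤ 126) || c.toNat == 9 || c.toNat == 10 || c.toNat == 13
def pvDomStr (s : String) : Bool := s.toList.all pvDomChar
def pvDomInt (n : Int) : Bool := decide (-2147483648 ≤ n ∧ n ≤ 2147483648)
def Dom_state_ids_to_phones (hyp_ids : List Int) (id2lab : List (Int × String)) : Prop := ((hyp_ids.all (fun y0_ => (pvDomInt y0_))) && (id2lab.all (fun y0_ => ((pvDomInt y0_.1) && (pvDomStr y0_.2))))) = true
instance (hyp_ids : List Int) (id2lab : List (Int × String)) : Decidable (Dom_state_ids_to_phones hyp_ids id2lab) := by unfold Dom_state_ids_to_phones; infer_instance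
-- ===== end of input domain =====

-- B replaces A's stateful prev-tracking loop by three declarative passes (map, collapse-by-shift-zip, filter); same cost, clearer shape.

-- ===== PORT A =====
-- shared helper, identical in both Pythons
def triphone_to_phone (label : String) : String :=
  let label := ((PySem.Str.split? (((PySem.Str.split? label "_s").getD []).headD "") "[").getD []).headD ""
  if PySem.Str.isIn "-" label && PySem.Str.isIn "+" label then
    ((PySem.Str.splitMax? (((PySem.Str.splitMax? label "-" 1).getD []).getD 1 "") "+" 1).getD []).getD 0 ""
  else if PySem.Str.isIn "-" label then
    ((PySem.Str.splitMax? label "-" 1).getD []).getD 1 ""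
  else if PySem.Str.isIn "+" label then
    ((PySem.Str.splitMax? label "+" 1).getD []).getD 0 ""
  else label

-- f'<unk:{sid}>'
def pvUnk (sid : Int) : String := String.ofList ("<unk:".toList ++ PySem.Int.toChars sid ++ ['>'])

-- SILENCE = {'sil', 'sp', 'SIL', 'SP', 'silence'}
def pvSILENCE : PySem.Set String := PySem.Set.ofList ["sil", "sp", "SIL", "SP", "silence"]

def state_ids_to_phones (hyp_ids : List Int) (id2lab : List (Int × String)) : List String :=
  (hyp_ids.foldl (fun (st : List String × Option String) sid =>
      let label := (id2lab.lookup sid).getD (pvUnk sid)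
      let phone := triphone_to_phone label
      if PySem.Set.contains pvSILENCE phone then (st.1, some phone)
      else if some phone ≠ st.2 then (st.1 ++ [phone], some phone)
      else (st.1, some phone))
    ([], none)).1

-- ===== PORT B =====
def state_ids_to_phones_alt (hyp_ids : List Int) (id2lab : List (Int × String)) : List String :=
  let centers := hyp_ids.map (fun sid => triphone_to_phone ((id2lab.lookup sid).getD (pvUnk sid)))
  let collapsed := ((centers.zip (none :: centers.map some)).filter (fun pq => decide (some pq.1 ≠ pq.2))).map (·.1)
  collapsed.filter (fun p => !(PySem.Set.contains pvSILENCE p))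

-- ===== PRECONDITION & SPEC =====
def Spec_state_ids_to_phones (hyp_ids : List Int) (id2lab : List (Int × String)) (out : List String) : Prop := out = state_ids_to_phones_alt hyp_ids id2lab
instance (hyp_ids : List Int) (id2lab : List (Int × String)) (out : List String) : Decidable (Spec_state_ids_to_phones hyp_ids id2lab out) := by unfold Spec_state_ids_to_phones; infer_instance

-- ===== CLAIM (what is proved, stated in full; the proofs are below) =====
def Claim_equal_state_ids_to_phones : Prop := ∀ (hyp_ids : List Int) (id2lab : List (Int × String)), Dom_state_ids_to_phones hyp_ids id2lab → Spec_state_ids_to_phones hyp_ids id2lab (state_ids_to_phones hyp_ids id2lab)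

-- ===== LEMMAS AND PROOFS =====
-- A's loop body, abstracted over the phone already computed
def pvStep (st : List String × Option String) (p : String) : List String × Option String :=
  if PySem.Set.contains pvSILENCE p then (st.1, some p)
  else if some p ≠ st.2 then (st.1 ++ [p], some p)
  else (st.1, some p)

-- collapse of consecutive duplicates, relative to a preceding element
def pvCollapse : Option String → List String → List String
  | _, [] => []
  | prev, p :: ps => if some p = prev then pvCollapse (some p) ps else p :: pvCollapse (some p) ps

lemma pvZip_eq (ps : List String) (q : Option String) :
    ((ps.zip (q :: ps.map some)).filter (fun pq => decide (some pq.1 ≠ pq.2))).map (·.1)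
      = pvCollapse q ps := by
  induction ps generalizing q with
  | nil => rfl
  | cons p ps ih =>
    have ih' := ih (some p)
    simp only [ne_eq, decide_not] at ih' ⊢
    simp only [List.map_cons, List.zip_cons_cons, List.filter_cons, pvCollapse]
    by_cases h : some p = q
    · subst h
      simpa using ih'
    · simp [h, ih']

lemma pvFold_eq (ps : List String) (acc : List String) (prev : Option String) :
    (ps.foldl pvStep (acc, prev)).1
      = acc ++ (pvCollapse prev ps).filter (fun p => !(PySem.Set.contains pvSILENCE p)) := by
  induction ps generalizing acc prev with
  | nil => simp [pvCollapse]
  | cons p ps ih =>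
    simp only [List.foldl_cons, pvStep, pvCollapse]
    by_cases hs : p ∈ pvSILENCE
    · by_cases h : some p = prev
      · simp [hs, h, ih]
      · simp [hs, h, ih]
    · by_cases h : some p = prev
      · simp [hs, h, ih]
      · simp [hs, h, ih]

-- ===== VERDICT (by name: the statement is the Claim_ definition above) =====
theorem state_ids_to_phones_spec : Claim_equal_state_ids_to_phones := by
  intro hyp_ids id2lab _
  show state_ids_to_phones hyp_ids id2lab = state_ids_to_phones_alt hyp_ids id2lab
  unfold state_ids_to_phones state_ids_to_phones_alt
  rw [show (fun (st : List String × Option String) (sid : Int) =>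
      let label := (id2lab.lookup sid).getD (pvUnk sid)
      let phone := triphone_to_phone label
      if PySem.Set.contains pvSILENCE phone then (st.1, some phone)
      else if some phone ≠ st.2 then (st.1 ++ [phone], some phone)
      else (st.1, some phone))
    = (fun st sid => pvStep st (triphone_to_phone ((id2lab.lookup sid).getD (pvUnk sid)))) from rfl,
    ← List.foldl_map]
  simp only [pvFold_eq, pvZip_eq, List.nil_append]
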